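-- pv_equiv track=rewrite | github.com/safwan188/Advanced-Ner-Pos-Tagger | tagger3.py | build_affix_vocab
-- ===== SOURCE A (Python) =====
-- def build_affix_vocab(sentences):
--     prefix_to_index = {'<UNK>': 0}
--     suffix_to_index = {'<UNK>': 0}
--     for sentence in sentences:
--         for word in sentence:
--             if len(word) >= 3:
--                 prefix = word[:3].lower()
--                 suffix = word[-3:].lower()
--                 if prefix not in prefix_to_index:
--                     prefix_to_index[prefix] = len(prefix_to_index)
--                 if suffix not in suffix_to_index:
--                     suffix_to_index[suffix] = len(suffix_to_index)
--     return prefix_to_index, suffix_to_index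
-- ===== SOURCE B (Python) =====
-- def build_affix_vocab(sentences):
--     words = [w for s in sentences for w in s if len(w) >= 3]
--
--     def vocab(keys):
--         ordered = sorted(set(keys), key=keys.index)
--         v = {'<UNK>': 0}
--         for i, k in enumerate(ordered, 1):
--             v[k] = i
--         return v
--
--     return (vocab([w[:3].lower() for w in words]),
--             vocab([w[-3:].lower() for w in words]))
-- ===== Notes on version B (the rewrite author's own statement) =====
-- stated objective: alternative
-- what changed: A assigns ids incrementally (len(dict)) inside one interleaved pass over the words; B deduplicates each key list with set() and recovers first-occurrence order by sorting the set under key=keys.index, then numbers the sorted keys from 1 after '<UNK>'.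
import Mathlib
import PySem

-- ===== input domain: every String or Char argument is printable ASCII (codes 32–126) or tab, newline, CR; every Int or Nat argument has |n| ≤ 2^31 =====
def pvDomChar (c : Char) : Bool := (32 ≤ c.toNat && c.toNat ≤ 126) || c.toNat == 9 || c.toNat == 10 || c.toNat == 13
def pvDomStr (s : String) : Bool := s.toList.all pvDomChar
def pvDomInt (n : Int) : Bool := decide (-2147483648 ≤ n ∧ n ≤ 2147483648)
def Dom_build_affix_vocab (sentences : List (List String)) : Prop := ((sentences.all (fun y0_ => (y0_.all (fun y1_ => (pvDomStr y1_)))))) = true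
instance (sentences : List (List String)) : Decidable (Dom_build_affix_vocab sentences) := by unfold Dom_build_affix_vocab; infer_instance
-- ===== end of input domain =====

-- B replaces A's single interleaved pass (which assigns len(dict) as it goes) by
-- set()-deduplication plus a sort under key=keys.index that recovers first-occurrence
-- order, then numbers the sorted keys from 1 after '<UNK>' (objective: alternative).

-- ===== PORT A =====
def build_affix_vocab (sentences : List (List String)) : (List (String × Int)) × (List (String × Int)) :=
  let st := sentences.foldl (fun st sentence =>
    sentence.foldl (fun st word =>
      if 3 ≤ PySem.Str.len word then
        let pre := PySem.Str.lower (PySem.Str.slice word none (some 3))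
        let suf := PySem.Str.lower (PySem.Str.slice word (some (-3)) none)
        let p := if st.1.contains pre then st.1 else st.1.insert pre (st.1.size : Int)
        let s := if st.2.contains suf then st.2 else st.2.insert suf (st.2.size : Int)
        (p, s)
      else st) st)
    ((PySem.Dict.mk [("<UNK>", 0)] : PySem.Dict String Int),
     (PySem.Dict.mk [("<UNK>", 0)] : PySem.Dict String Int))
  (st.1.items, st.2.items)

-- ===== PORT B =====
-- vocab(keys): sorted(set(keys), key=keys.index), then v = {'<UNK>':0}; v[k] = i for i,k in enumerate(ordered,1).
-- keys.index k → (PySem.List.index? keys k).getD 0: exact here, since every element of set(keys) occurs in keys.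
def pvVocab (keys : List String) : List (String × Int) :=
  let ordered := PySem.List.sorted (PySem.Set.ofList keys)
      (fun k => (PySem.List.index? keys k).getD 0) false
  ((PySem.List.enumerate ordered 1).foldl (fun d p => d.insert p.2 p.1)
    (PySem.Dict.mk [("<UNK>", 0)] : PySem.Dict String Int)).items

def build_affix_vocab_alt (sentences : List (List String)) : (List (String × Int)) × (List (String × Int)) :=
  let words := sentences.flatMap (fun s => s.filter (fun w => 3 ≤ PySem.Str.len w))
  (pvVocab (words.map (fun w => PySem.Str.lower (PySem.Str.slice w none (some 3)))),
   pvVocab (words.map (fun w => PySem.Str.lower (PySem.Str.slice w (some (-3)) none))))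

-- ===== PRECONDITION & SPEC =====
def Spec_build_affix_vocab (sentences : List (List String)) (out : (List (String × Int)) × (List (String × Int))) : Prop := out = build_affix_vocab_alt sentences
instance (sentences : List (List String)) (out : (List (String × Int)) × (List (String × Int))) : Decidable (Spec_build_affix_vocab sentences out) := by unfold Spec_build_affix_vocab; infer_instance

-- ===== CLAIM (what is proved, stated in full; the proofs are below) =====
def Claim_equal_build_affix_vocab : Prop := ∀ (sentences : List (List String)), Dom_build_affix_vocab sentences → Spec_build_affix_vocab sentences (build_affix_vocab sentences)

-- ===== LEMMAS AND PROOFS =====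

-- A's incremental "if key not in dict: dict[key] = len(dict)" step
def pvStepD (d : PySem.Dict String Int) (k : String) : PySem.Dict String Int :=
  if d.contains k then d else d.insert k (d.size : Int)

-- the dict {'<UNK>': 0} extended with keys L at indices 1..|L|
def pvDictAcc (L : List String) : PySem.Dict String Int :=
  PySem.Dict.mk (("<UNK>", 0) :: (L.zipIdx 1).map (fun p => (p.1, (p.2 : Int))))

theorem pvContains_dictAcc (L : List String) (k : String) :
    (pvDictAcc L).contains k = true ↔ (k = "<UNK>" ∨ k ∈ L) := by
  have hL : (L.zipIdx 1).map Prod.fst = L := by simp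
  have hmem : k ∈ L ↔ ∃ p ∈ L.zipIdx 1, p.1 = k := by
    constructor
    · intro h
      rw [← hL] at h
      obtain ⟨p, hp, he⟩ := List.mem_map.mp h
      exact ⟨p, hp, he⟩
    · rintro ⟨⟨a, i⟩, hp, he⟩
      subst he
      rw [← hL]
      exact List.mem_map_of_mem hp
  simp only [pvDictAcc, PySem.Dict.contains, List.any_cons, List.any_map,
    List.any_eq_true, Bool.or_eq_true, beq_iff_eq, Function.comp, hmem]
  constructor
  · rintro (h | ⟨p, hp, he⟩)
    · exact Or.inl h.symm
    · exact Or.inr ⟨p, hp, he⟩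
  · rintro (h | ⟨p, hp, he⟩)
    · exact Or.inl h.symm
    · exact Or.inr ⟨p, hp, he⟩

theorem pvStep_mem (L : List String) (k : String) (h : k ∈ L) :
    pvStepD (pvDictAcc L) k = pvDictAcc L := by
  have h1 : (pvDictAcc L).contains k = true := (pvContains_dictAcc L k).mpr (Or.inr h)
  simp [pvStepD, h1]

theorem pvStep_fresh (L : List String) (k : String) (hk : k ≠ "<UNK>") (h : k ∉ L) :
    pvStepD (pvDictAcc L) k = pvDictAcc (L ++ [k]) := by
  have h1 : (pvDictAcc L).contains k = false := by
    rw [Bool.eq_false_iff]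
    intro hc
    rcases (pvContains_dictAcc L k).mp hc with h' | h'
    · exact hk h'
    · exact h h'
  unfold pvStepD
  rw [h1]
  simp only [Bool.false_eq_true, if_false]
  unfold PySem.Dict.insert
  rw [h1]
  simp only [Bool.false_eq_true, if_false]
  simp [pvDictAcc, PySem.Dict.size, List.zipIdx_append, Nat.add_comm]

theorem pvLoop_eq (ks : List String) : ∀ (L : List String), (∀ k ∈ ks, k ≠ "<UNK>") →
    ks.foldl pvStepD (pvDictAcc L) = pvDictAcc (ks.foldl PySem.Set.add L) := by
  induction ks with
  | nil => intro L _; rfl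
  | cons k ks ih =>
    intro L hks
    have hk : k ≠ "<UNK>" := hks k (List.mem_cons_self ..)
    by_cases hm : k ∈ L
    · have ha : PySem.Set.add L k = L := by
        simp [PySem.Set.add, PySem.Set.contains, hm]
      rw [List.foldl_cons, List.foldl_cons, pvStep_mem L k hm, ha]
      exact ih L (fun k' h' => hks k' (List.mem_cons_of_mem _ h'))
    · have ha : PySem.Set.add L k = L ++ [k] := by
        simp [PySem.Set.add, PySem.Set.contains, hm]
      rw [List.foldl_cons, List.foldl_cons, pvStep_fresh L k hk hm, ha]
      exact ih (L ++ [k]) (fun k' h' => hks k' (List.mem_cons_of_mem _ h'))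

theorem pvEnum_zipIdx (keys : List String) : ∀ (n : Nat),
    (PySem.List.enumerate keys (n : Int)).map (fun p => (p.2, p.1))
      = (keys.zipIdx n).map (fun p => (p.1, (p.2 : Int))) := by
  induction keys with
  | nil => intro n; rfl
  | cons k t ih =>
    intro n
    simp only [PySem.List.enumerate, List.zipIdx_cons, List.map_cons]
    rw [show ((n : Int) + 1) = ((n + 1 : Nat) : Int) by push_cast; ring, ih (n + 1)]

-- the enumerate-from-1 dict build equals pvDictAcc, for fresh nodup keys
theorem pvMerge_eq (keys : List String) (hnd : keys.Nodup) (hu : "<UNK>" ∉ keys) :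
    ((PySem.List.enumerate keys 1).foldl (fun d p => d.insert p.2 p.1)
      (PySem.Dict.mk [("<UNK>", 0)] : PySem.Dict String Int)).items = (pvDictAcc keys).items := by
  have h1 : ∀ p ∈ PySem.List.enumerate keys 1,
      (PySem.Dict.mk [("<UNK>", (0 : Int))] : PySem.Dict String Int).contains p.2 = false := by
    intro p hp
    have hmem : p.2 ∈ keys := by
      rw [← PySem.List.map_snd_enumerate keys 1]
      exact List.mem_map_of_mem hp
    have hne : p.2 ≠ "<UNK>" := fun e => hu (e ▸ hmem)
    simp [PySem.Dict.contains, Ne.symm hne]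
  have h2 : ((PySem.List.enumerate keys 1).map (fun p => p.2)).Nodup := by
    rw [PySem.List.map_snd_enumerate keys 1]
    exact hnd
  have h3 := PySem.Dict.items_foldl_insert_fresh (PySem.List.enumerate keys 1)
    (fun p => p.2) (fun p => p.1) (PySem.Dict.mk [("<UNK>", (0 : Int))]) h1 h2
  have h4 := pvEnum_zipIdx keys 1
  norm_num at h4
  calc ((PySem.List.enumerate keys 1).foldl (fun d p => d.insert p.2 p.1)
        (PySem.Dict.mk [("<UNK>", 0)] : PySem.Dict String Int)).items
      = ("<UNK>", (0 : Int)) :: (PySem.List.enumerate keys 1).map (fun p => (p.2, p.1)) := h3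
    _ = ("<UNK>", (0 : Int)) :: (keys.zipIdx 1).map (fun p => (p.1, (p.2 : Int))) := by rw [h4]
    _ = (pvDictAcc keys).items := rfl

-- foldl Set.add from an arbitrary accumulator: the fresh part is a filter of the from-[] run
theorem pvFoldlAdd (xs : List String) : ∀ (s : List String),
    xs.foldl PySem.Set.add s
      = s ++ (xs.foldl PySem.Set.add []).filter (fun y => ¬ y ∈ s) := by
  induction xs with
  | nil => intro s; simp
  | cons x xs ih =>
    intro s
    have hadd : ∀ (t : List String), PySem.Set.add t x = if x ∈ t then t else t ++ [x] := by
      intro t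
      simp [PySem.Set.add, PySem.Set.contains, List.contains_eq_mem]
    rw [List.foldl_cons, List.foldl_cons, ih (PySem.Set.add s x), ih (PySem.Set.add [] x),
      hadd s, hadd []]
    simp only [List.not_mem_nil, if_false, List.nil_append, List.filter_append]
    by_cases hx : x ∈ s
    · rw [if_pos hx]
      have h1 : (([x] : List String).filter (fun y => ¬ y ∈ s)) = [] := by
        simp [hx]
      rw [h1, List.nil_append, List.filter_filter]
      congr 1
      apply List.filter_congr
      intro y _
      by_cases hy : y ∈ s
      · simp [hy]
      · have : y ≠ x := fun e => hy (e ▸ hx)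
        simp [hy, this]
    · rw [if_neg hx]
      have h1 : (([x] : List String).filter (fun y => ¬ y ∈ s)) = [x] := by
        simp [hx]
      rw [h1, List.filter_filter, List.append_assoc]
      congr 2
      apply List.filter_congr
      intro y _
      by_cases hys : y ∈ s
      · simp [hys, List.mem_append]
      · by_cases hyx : y = x <;> simp [hys, hyx, List.mem_append]

theorem pvOfList_cons (x : String) (xs : List String) :
    PySem.Set.ofList (x :: xs) = x :: (PySem.Set.ofList xs).filter (fun y => ¬ y = x) := by
  have h0 : PySem.Set.add ([] : List String) x = [x] := by
    simp [PySem.Set.add, PySem.Set.contains]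
  rw [PySem.Set.ofList_eq_foldl, List.foldl_cons, h0, pvFoldlAdd xs [x],
    PySem.Set.ofList_eq_foldl]
  simp

-- set(keys) in first-occurrence order is strictly increasing under keys.index
theorem pvOfList_pairwise (keys : List String) :
    (PySem.Set.ofList keys).Pairwise
      (fun a b => (PySem.List.index? keys a).getD 0 < (PySem.List.index? keys b).getD 0) := by
  induction keys with
  | nil => simp [PySem.Set.ofList, PySem.Set.empty]
  | cons x xs ih =>
    rw [pvOfList_cons]
    constructor
    · intro b hb
      have hbx : ¬ b = x := by simpa using (List.mem_filter.mp hb).2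
      have hbm : b ∈ xs := (PySem.Set.mem_ofList xs b).mp (List.mem_filter.mp hb).1
      obtain ⟨k, hk⟩ := Option.isSome_iff_exists.mp
        ((PySem.List.index?_isSome_iff xs b).mpr hbm)
      rw [PySem.List.index?_cons_self _ _, PySem.List.index?_cons_of_ne _ (fun e => hbx e.symm), hk]
      simp
    · have hsub : ((PySem.Set.ofList xs).filter (fun y => ¬ y = x)).Sublist (PySem.Set.ofList xs) :=
        List.filter_sublist
      refine List.Pairwise.imp_of_mem (fun {a b} ha hb hlt => ?_) (ih.sublist hsub)
      have hax : ¬ a = x := by simpa using (List.mem_filter.mp ha).2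
      have hbx : ¬ b = x := by simpa using (List.mem_filter.mp hb).2
      rw [PySem.List.index?_cons_of_ne _ (fun e => hax e.symm),
        PySem.List.index?_cons_of_ne _ (fun e => hbx e.symm)]
      have ham : a ∈ xs := (PySem.Set.mem_ofList xs a).mp (List.mem_filter.mp ha).1
      have hbm : b ∈ xs := (PySem.Set.mem_ofList xs b).mp (List.mem_filter.mp hb).1
      obtain ⟨j, hj⟩ := Option.isSome_iff_exists.mp ((PySem.List.index?_isSome_iff xs a).mpr ham)
      obtain ⟨k, hk⟩ := Option.isSome_iff_exists.mp ((PySem.List.index?_isSome_iff xs b).mpr hbm)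
      rw [hj, hk] at hlt ⊢
      simpa using hlt

theorem pvSorted_ofList (keys : List String) :
    PySem.List.sorted (PySem.Set.ofList keys)
        (fun k => (PySem.List.index? keys k).getD 0) false = PySem.Set.ofList keys :=
  PySem.List.sorted_eq_of_perm_of_pairwise_lt _ _ _ (List.Perm.refl _) (pvOfList_pairwise keys)

theorem pvVocab_eq (keys : List String) (hu : "<UNK>" ∉ keys) :
    pvVocab keys = (pvDictAcc (PySem.Set.ofList keys)).items := by
  unfold pvVocab
  rw [pvSorted_ofList]
  exact pvMerge_eq _ (PySem.Set.nodup_ofList _)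
    (fun hm => hu ((PySem.Set.mem_ofList _ _).mp hm))

theorem pvFilter_flatten (c : String → Bool) (l : List (List String)) :
    l.flatten.filter c = l.flatMap (fun s => s.filter c) := by
  induction l with
  | nil => rfl
  | cons s t ih => simp [List.filter_append, ih]

theorem pvKey_ne_unk (w : String) (a b : Option Int)
    (h : (PySem.List.slice w.toList a b).length ≤ 3) :
    PySem.Str.lower (PySem.Str.slice w a b) ≠ "<UNK>" := by
  intro he
  have h5 : (PySem.Str.lower (PySem.Str.slice w a b)).toList.length = 5 := by
    rw [he]; rfl
  simp [PySem.Str.toList_lower, PySem.Chars.lower] at h5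
  omega

theorem pvSliceLen_pre (w : String) : (PySem.List.slice w.toList none (some 3)).length ≤ 3 := by
  simp [PySem.List.slice, PySem.List.clampIdx]
  try omega

theorem pvSliceLen_suf (w : String) : (PySem.List.slice w.toList (some (-3)) none).length ≤ 3 := by
  simp only [PySem.List.slice, PySem.List.clampIdx]
  split_ifs with h1 h2
  · simp only [List.length_take, List.length_drop]
    omega
  · simp only [List.length_take, List.length_drop]
    omega
  · exact absurd (by norm_num) h1

theorem pvSplitA (l : List String) :
    ∀ (ab : PySem.Dict String Int × PySem.Dict String Int),
    l.foldl (fun st w =>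
        if 3 ≤ PySem.Str.len w then
          (pvStepD st.1 (PySem.Str.lower (PySem.Str.slice w none (some 3))),
           pvStepD st.2 (PySem.Str.lower (PySem.Str.slice w (some (-3)) none)))
        else st) ab
      = ((l.filter (fun w => 3 ≤ PySem.Str.len w)).foldl
            (fun d w => pvStepD d (PySem.Str.lower (PySem.Str.slice w none (some 3)))) ab.1,
         (l.filter (fun w => 3 ≤ PySem.Str.len w)).foldl
            (fun d w => pvStepD d (PySem.Str.lower (PySem.Str.slice w (some (-3)) none))) ab.2) := by
  induction l with
  | nil => intro ab; rfl
  | cons w t ih =>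
    intro ab
    by_cases h : 3 ≤ PySem.Str.len w
    · rw [List.foldl_cons, if_pos h, List.filter_cons_of_pos (by simpa using h), ih,
        List.foldl_cons, List.foldl_cons]
    · rw [List.foldl_cons, if_neg h, List.filter_cons_of_neg (by simpa using h), ih]

-- ===== VERDICT (by name: the statement is the Claim_ definition above) =====
theorem build_affix_vocab_spec : Claim_equal_build_affix_vocab := by
  intro sentences _
  unfold Spec_build_affix_vocab build_affix_vocab build_affix_vocab_alt
  have hfun : (fun (st : PySem.Dict String Int × PySem.Dict String Int) word =>
        if 3 ≤ PySem.Str.len word then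
          let pre := PySem.Str.lower (PySem.Str.slice word none (some 3))
          let suf := PySem.Str.lower (PySem.Str.slice word (some (-3)) none)
          let p := if st.1.contains pre then st.1 else st.1.insert pre (st.1.size : Int)
          let s := if st.2.contains suf then st.2 else st.2.insert suf (st.2.size : Int)
          (p, s)
        else st)
      = (fun (st : PySem.Dict String Int × PySem.Dict String Int) w =>
          if 3 ≤ PySem.Str.len w then
            (pvStepD st.1 (PySem.Str.lower (PySem.Str.slice w none (some 3))),
             pvStepD st.2 (PySem.Str.lower (PySem.Str.slice w (some (-3)) none)))
          else st) := by
    funext st w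
    by_cases h : 3 ≤ PySem.Str.len w <;> simp only [h, if_true, if_false, pvStepD]
  rw [← List.foldl_flatten, hfun, pvSplitA]
  have hbase : (PySem.Dict.mk [("<UNK>", (0 : Int))] : PySem.Dict String Int) = pvDictAcc [] := rfl
  have hne_pre : ∀ k ∈ (sentences.flatten.filter (fun w => decide (3 ≤ PySem.Str.len w))).map
      (fun w => PySem.Str.lower (PySem.Str.slice w none (some 3))), k ≠ "<UNK>" := by
    intro k hk
    rcases List.mem_map.mp hk with ⟨w, _, rfl⟩
    exact pvKey_ne_unk w none (some 3) (pvSliceLen_pre w)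
  have hne_suf : ∀ k ∈ (sentences.flatten.filter (fun w => decide (3 ≤ PySem.Str.len w))).map
      (fun w => PySem.Str.lower (PySem.Str.slice w (some (-3)) none)), k ≠ "<UNK>" := by
    intro k hk
    rcases List.mem_map.mp hk with ⟨w, _, rfl⟩
    exact pvKey_ne_unk w (some (-3)) none (pvSliceLen_suf w)
  have hmap1 : ∀ (l : List String) (d : PySem.Dict String Int),
      l.foldl (fun d w => pvStepD d (PySem.Str.lower (PySem.Str.slice w none (some 3)))) d
        = (l.map (fun w => PySem.Str.lower (PySem.Str.slice w none (some 3)))).foldl pvStepD d :=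
    fun l d => (List.foldl_map).symm
  have hmap2 : ∀ (l : List String) (d : PySem.Dict String Int),
      l.foldl (fun d w => pvStepD d (PySem.Str.lower (PySem.Str.slice w (some (-3)) none))) d
        = (l.map (fun w => PySem.Str.lower (PySem.Str.slice w (some (-3)) none))).foldl pvStepD d :=
    fun l d => (List.foldl_map).symm
  rw [hbase]
  dsimp only
  rw [hmap1, hmap2, pvLoop_eq _ [] hne_pre, pvLoop_eq _ [] hne_suf, ← pvFilter_flatten]
  have hded : ∀ (ks : List String),
      ks.foldl PySem.Set.add [] = PySem.Set.ofList ks := fun ks => (PySem.Set.ofList_eq_foldl ks).symm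
  rw [hded, hded]
  rw [pvVocab_eq _ (fun hm => (hne_pre _ (by simpa using hm)) rfl),
    pvVocab_eq _ (fun hm => (hne_suf _ (by simpa using hm)) rfl)]
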